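-- pv_equiv track=rewrite | github.com/andornaut/python-exercises | exercises/gift_exchange.py | _assign_exchangers
-- ===== SOURCE A (Python) =====
-- def _assign_exchangers(
--     givers: list[str], receivers: list[str]
-- ) -> list[tuple[str, str]]:
--     exchangers = []
--     have_received = set()
--     for giver in givers:
--         for receiver in receivers:
--             if giver == receiver:
--                 continue
--             if receiver in have_received:
--                 continue
--             exchangers.append((giver, receiver))
--             have_received.add(receiver)
--             break
--     return exchangers
-- ===== SOURCE B (Python) =====
-- def _assign_exchangers(
--     givers: list[str], receivers: list[str]
-- ) -> list[tuple[str, str]]: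
--     # Available receivers = distinct names in first-occurrence order, kept
--     # reversed so that taking the next one is pop() (O(1)) instead of a scan.
--     avail = list(dict.fromkeys(receivers))
--     avail.reverse()
--     exchangers = []
--     for giver in givers:
--         if not avail:
--             continue
--         if avail[-1] != giver:
--             exchangers.append((giver, avail.pop()))
--         elif len(avail) >= 2:
--             exchangers.append((giver, avail[-2]))
--             del avail[-2]
--     return exchangers
-- ===== Notes on version B (the rewrite author's own statement) =====
-- stated objective: faster
-- what changed: Replaces the per-giver rescan of all receivers with a deduplicated list of still-available receivers consumed from its end, so each giver is served in O(1) instead of O(len(receivers)).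
import Mathlib
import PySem

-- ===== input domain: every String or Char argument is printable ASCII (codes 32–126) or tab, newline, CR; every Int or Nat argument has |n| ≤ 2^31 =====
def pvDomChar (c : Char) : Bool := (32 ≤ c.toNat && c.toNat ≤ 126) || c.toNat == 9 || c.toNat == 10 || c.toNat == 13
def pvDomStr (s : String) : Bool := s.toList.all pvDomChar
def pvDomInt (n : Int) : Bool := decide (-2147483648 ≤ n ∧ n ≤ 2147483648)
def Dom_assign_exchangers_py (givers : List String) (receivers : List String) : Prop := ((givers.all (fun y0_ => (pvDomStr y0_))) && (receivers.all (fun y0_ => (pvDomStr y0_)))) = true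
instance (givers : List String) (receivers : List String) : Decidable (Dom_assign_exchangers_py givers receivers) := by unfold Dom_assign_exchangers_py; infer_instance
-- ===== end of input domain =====

-- B replaces A's per-giver rescan of the whole receiver list by a deduplicated
-- list of still-available receivers consumed from its end (O(1) per giver).

-- ===== PORT A =====
-- inner 'for receiver in receivers' with break: returns the receiver taken, if any
def aInner (giver : String) (receivers : List String) (have_received : PySem.Set String) : Option String :=
  match receivers with
  | [] => none
  | receiver :: rest =>
    if giver == receiver then aInner giver rest have_received
    else if PySem.Set.contains have_received receiver then aInner giver rest have_received
    else some receiver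

-- outer 'for giver in givers' carrying exchangers and have_received
def aLoop (receivers : List String) (givers : List String)
    (exchangers : List (String × String)) (have_received : PySem.Set String) :
    List (String × String) :=
  match givers with
  | [] => exchangers
  | giver :: gs =>
    match aInner giver receivers have_received with
    | none => aLoop receivers gs exchangers have_received
    | some receiver =>
        aLoop receivers gs (exchangers ++ [(giver, receiver)])
          (PySem.Set.add have_received receiver)

def assign_exchangers_py (givers : List String) (receivers : List String) :
    List (String × String) :=
  aLoop receivers givers [] PySem.Set.empty

-- ===== PORT B =====
-- 'avail' models the Python list with its LAST element as Lean head (the Python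
-- list is the dedup reversed, so the Lean list is just the dedup): avail[-1] is
-- the head, pop() is tail, del avail[-2] drops the second element.
def bLoop (givers : List String) (avail : List String)
    (exchangers : List (String × String)) : List (String × String) :=
  match givers with
  | [] => exchangers
  | giver :: gs =>
    match avail with
    | [] => bLoop gs [] exchangers
    | a :: rest =>
      if a != giver then bLoop gs rest (exchangers ++ [(giver, a)])
      else
        match rest with
        | [] => bLoop gs avail exchangers
        | b :: rest2 => bLoop gs (a :: rest2) (exchangers ++ [(giver, b)])

def assign_exchangers_py_alt (givers : List String) (receivers : List String) :
    List (String × String) :=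
  bLoop givers (PySem.List.dedup receivers) []

-- ===== PRECONDITION & SPEC =====
def Spec_assign_exchangers_py (givers : List String) (receivers : List String) (out : List (String × String)) : Prop := out = assign_exchangers_py_alt givers receivers
instance (givers : List String) (receivers : List String) (out : List (String × String)) : Decidable (Spec_assign_exchangers_py givers receivers out) := by unfold Spec_assign_exchangers_py; infer_instance

-- ===== CLAIM (what is proved, stated in full; the proofs are below) =====
def Claim_equal_assign_exchangers_py : Prop := ∀ (givers : List String) (receivers : List String), Dom_assign_exchangers_py givers receivers → Spec_assign_exchangers_py givers receivers (assign_exchangers_py givers receivers)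

-- ===== LEMMAS AND PROOFS =====

-- the available receivers after have_received has grown to S
def pvAvail (receivers : List String) (S : PySem.Set String) : List String :=
  (PySem.List.dedup receivers).filter (fun x => !(PySem.Set.contains S x))

lemma pv_find?_filter' (p q : String → Bool) (l : List String) :
    (l.filter p).find? q = l.find? (fun a => p a && q a) := by
  rw [List.find?_filter]; congr 1; funext a; simp

lemma pv_dedup_cons (x : String) (xs : List String) :
    PySem.List.dedup (x :: xs) = x :: (PySem.List.dedup xs).filter (fun y => y != x) := by
  rw [PySem.List.dedup_eq_ofList, PySem.List.dedup_eq_ofList, PySem.Set.ofList_cons]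
  rfl

lemma pv_find?_dedup (p : String → Bool) :
    ∀ l : List String, (PySem.List.dedup l).find? p = l.find? p := by
  intro l
  induction l with
  | nil => rfl
  | cons x xs ih =>
    rw [pv_dedup_cons]
    cases hp : p x with
    | true => rw [List.find?_cons_of_pos (p := p) hp, List.find?_cons_of_pos (p := p) hp]
    | false =>
      rw [List.find?_cons_of_neg (p := p) (by simp [hp]), List.find?_cons_of_neg (p := p) (by simp [hp]),
        pv_find?_filter']
      rw [← ih]
      congr 1
      funext y
      by_cases hyx : y = x
      · subst hyx; simp [hp]
      · simp [hyx]

lemma pv_aInner_eq_find?_raw (g : String) (recs : List String) :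
    ∀ S : PySem.Set String,
      aInner g recs S = recs.find? (fun r => !(PySem.Set.contains S r) && (r != g)) := by
  induction recs with
  | nil => intro S; rfl
  | cons r rest ih =>
    intro S
    show (if g == r then aInner g rest S
          else if PySem.Set.contains S r then aInner g rest S else some r) = _
    cases hgr : (g == r) with
    | true =>
      have hg : g = r := by simpa using hgr
      have hf : (!(PySem.Set.contains S r) && (r != g)) = false := by
        subst hg; simp
      rw [if_pos rfl,
        List.find?_cons_of_neg (p := fun r => !(PySem.Set.contains S r) && (r != g)) (ne_true_of_eq_false hf),
        ih S]
    | false =>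
      rw [if_neg (by simp [hgr])]
      cases hc : PySem.Set.contains S r with
      | true =>
        have hf : (!(PySem.Set.contains S r) && (r != g)) = false := by rw [hc]; simp
        rw [if_pos rfl,
          List.find?_cons_of_neg (p := fun r => !(PySem.Set.contains S r) && (r != g)) (ne_true_of_eq_false hf),
          ih S]
      | false =>
        have hrg : (r != g) = true := by
          simp only [bne_iff_ne, ne_eq]
          intro h; subst h; simp at hgr
        have hf : (!(PySem.Set.contains S r) && (r != g)) = true := by rw [hc, hrg]; simp
        rw [if_neg (by simp [hc]),
          List.find?_cons_of_pos (p := fun r => !(PySem.Set.contains S r) && (r != g)) hf]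

lemma pv_aInner_eq_find? (g : String) (S : PySem.Set String) (recs : List String) :
    aInner g recs S = (pvAvail recs S).find? (fun x => x != g) := by
  rw [pvAvail, pv_find?_filter', pv_find?_dedup, pv_aInner_eq_find?_raw]

lemma pv_not_contains_add (S : PySem.Set String) (x y : String) :
    (!(PySem.Set.contains (PySem.Set.add S x) y)) = ((!(PySem.Set.contains S y)) && (y != x)) := by
  have e1 := PySem.Set.contains_iff S y
  have e2 := PySem.Set.contains_iff (PySem.Set.add S x) y
  rw [PySem.Set.mem_add] at e2
  cases h1 : PySem.Set.contains S y <;> cases h2 : PySem.Set.contains (PySem.Set.add S x) y <;>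
    simp_all [bne_iff_ne]

lemma pv_avail_add (recs : List String) (S : PySem.Set String) (x : String) :
    pvAvail recs (PySem.Set.add S x) = (pvAvail recs S).filter (fun y => y != x) := by
  rw [pvAvail, pvAvail, List.filter_filter]
  congr 1
  funext y
  rw [pv_not_contains_add, Bool.and_comm]

lemma pv_avail_nodup (recs : List String) (S : PySem.Set String) :
    (pvAvail recs S).Nodup :=
  (PySem.List.nodup_dedup recs).filter _

lemma pv_filter_ne_of_nodup_head (a : String) (rest : List String) (h : (a :: rest).Nodup) :
    (a :: rest).filter (fun y => y != a) = rest := by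
  have ha : a ∉ rest := (List.nodup_cons.mp h).1
  rw [List.filter_cons_of_neg (by simp)]
  exact List.filter_eq_self.mpr (fun y hy => by
    simp only [bne_iff_ne, ne_eq]
    intro he; subst he; exact ha hy)

lemma pv_main (recs : List String) :
    ∀ (gs : List String) (S : PySem.Set String) (acc : List (String × String)),
      aLoop recs gs acc S = bLoop gs (pvAvail recs S) acc := by
  intro gs
  induction gs with
  | nil => intro S acc; rfl
  | cons g gs ih =>
    intro S acc
    show (match aInner g recs S with
          | none => aLoop recs gs acc S
          | some receiver => aLoop recs gs (acc ++ [(g, receiver)]) (PySem.Set.add S receiver)) = _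
    rw [pv_aInner_eq_find?]
    have hnd := pv_avail_nodup recs S
    cases havail : pvAvail recs S with
    | nil =>
      show aLoop recs gs acc S = bLoop gs [] acc
      rw [ih S acc, havail]
    | cons a rest =>
      rw [havail] at hnd
      cases hag : (a != g) with
      | true =>
        rw [List.find?_cons_of_pos (p := fun x => x != g) hag]
        show aLoop recs gs (acc ++ [(g, a)]) (PySem.Set.add S a) = _
        rw [ih, pv_avail_add, havail, pv_filter_ne_of_nodup_head a rest hnd]
        show _ = bLoop (g :: gs) (a :: rest) acc
        simp [bLoop, hag]
      | false =>
        have hga : a = g := by simpa using hag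
        rw [List.find?_cons_of_neg (p := fun x => x != g) (by simp [hag])]
        cases rest with
        | nil =>
          show aLoop recs gs acc S = bLoop (g :: gs) [a] acc
          rw [ih S acc, havail]
          simp [bLoop, hag]
        | cons b rest2 =>
          have hab : a ≠ b := by
            intro h; subst h; exact (List.nodup_cons.mp hnd).1 (List.mem_cons_self ..)
          have hbg : (b != g) = true := by
            subst hga; simp [bne_iff_ne]; exact fun h => hab h.symm
          rw [List.find?_cons_of_pos (p := fun x => x != g) hbg]
          show aLoop recs gs (acc ++ [(g, b)]) (PySem.Set.add S b) = _
          rw [ih, pv_avail_add, havail]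
          have hrest : (a :: b :: rest2).filter (fun y => y != b) = a :: rest2 := by
            rw [List.filter_cons_of_pos (by simp [bne_iff_ne]; exact hab)]
            have : (b :: rest2).Nodup := (List.nodup_cons.mp hnd).2
            exact congrArg (a :: ·) (pv_filter_ne_of_nodup_head b rest2 this)
          rw [hrest]
          show _ = bLoop (g :: gs) (a :: b :: rest2) acc
          simp [bLoop, hag]

lemma pv_avail_empty (recs : List String) :
    pvAvail recs PySem.Set.empty = PySem.List.dedup recs := by
  rw [pvAvail]
  exact List.filter_eq_self.mpr (fun y _ => rfl)

-- ===== VERDICT (by name: the statement is the Claim_ definition above) =====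
theorem assign_exchangers_py_spec : Claim_equal_assign_exchangers_py := by
  intro givers receivers _
  unfold Spec_assign_exchangers_py assign_exchangers_py assign_exchangers_py_alt
  rw [pv_main receivers givers PySem.Set.empty [], pv_avail_empty]
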